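-- pv_equiv track=rewrite | github.com/Xinyisun-creator/sai2_import-export | read_Systemax.py | _update_grp_content
-- ===== SOURCE A (Python) =====
-- def _update_grp_content(grp_content: str, dat_mapping: dict) -> str:
--     """
--     更新grp文件内容，使用新的dat文件映射
--
--     Args:
--         grp_content: 原始grp文件内容
--         dat_mapping: 原始ID到新ID的映射字典
--
--     Returns:
--         str: 更新后的grp文件内容
--     """
--     lines = grp_content.splitlines()
--     updated_lines = []
--     in_brush_section = False
--     current_brush = None
--
--     for line in lines:
--         if line == '.':
--             in_brush_section = not in_brush_section
--             updated_lines.append(line)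
--             continue
--
--         if in_brush_section and line.startswith('dataid='):
--             # 更新dataid
--             old_id = int(line.split('=')[1])
--             if old_id in dat_mapping:
--                 line = f"dataid={dat_mapping[old_id]}"
--
--         updated_lines.append(line)
--
--     return '\n'.join(updated_lines)
-- ===== SOURCE B (Python) =====
-- def _map_line(line, dat_mapping):
--     if line.startswith('dataid='):
--         old_id = int(line.split('=')[1])
--         if old_id in dat_mapping:
--             return f"dataid={dat_mapping[old_id]}"
--     return line
--
--
-- def _update_grp_content(grp_content: str, dat_mapping: dict) -> str:
--     # Partition the lines into segments delimited by '.' lines;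
--     # odd-indexed segments are inside a brush section.
--     segments = [[]]
--     for line in grp_content.splitlines():
--         if line == '.':
--             segments.append([])
--         else:
--             segments[-1].append(line)
--     out_lines = []
--     for i, seg in enumerate(segments):
--         if i:
--             out_lines.append('.')
--         if i % 2 == 1:
--             seg = [_map_line(l, dat_mapping) for l in seg]
--         out_lines.extend(seg)
--     return '\n'.join(out_lines)
-- ===== Notes on version B (the rewrite author's own statement) =====
-- stated objective: alternative
-- what changed: Replaced A's single stateful pass (toggling an in_brush flag per line) by a three-phase decomposition: partition the lines into segments delimited by '.' lines, map the dataid rewrite over the odd-indexed (brush) segments only, and reassemble with the '.' delimiters re-interleaved.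
import Mathlib
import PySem

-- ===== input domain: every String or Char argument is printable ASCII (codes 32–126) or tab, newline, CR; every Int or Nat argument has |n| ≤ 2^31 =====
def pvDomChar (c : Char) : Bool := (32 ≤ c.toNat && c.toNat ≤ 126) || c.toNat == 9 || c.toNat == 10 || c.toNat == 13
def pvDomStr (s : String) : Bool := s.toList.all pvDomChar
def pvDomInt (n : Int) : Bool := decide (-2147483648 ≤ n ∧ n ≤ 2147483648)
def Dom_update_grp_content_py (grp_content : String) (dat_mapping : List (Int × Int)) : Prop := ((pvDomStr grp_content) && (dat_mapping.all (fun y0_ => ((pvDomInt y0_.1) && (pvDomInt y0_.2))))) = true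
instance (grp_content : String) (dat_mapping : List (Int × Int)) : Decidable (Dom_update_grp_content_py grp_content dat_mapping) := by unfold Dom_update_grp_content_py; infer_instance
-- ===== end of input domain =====

-- B rewrites the stateful dot-toggle loop as partition-into-segments / map-odd-segments / reassemble (same cost; objective: alternative decomposition).


-- ===== PORT A =====
-- A's single pass: toggle `inB` at '.' lines, rewrite dataid lines while inside.
-- On int() failure (Python ValueError, excluded by Pre_) the port keeps the line.
def pvUpdLoop (dm : List (Int × Int)) : List String → Bool → List String
  | [], _ => []
  | line :: rest, inB =>
    if line = "." then
      line :: pvUpdLoop dm rest (!inB)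
    else if inB && PySem.Str.startswith line "dataid=" then
      (match PySem.List.pyGet? (((PySem.Str.split? line "=").getD [])) 1 with
       | none => line
       | some part =>
         match PySem.Int.ofStr? part with
         | none => line   -- Python raises ValueError here; these inputs are outside Pre_
         | some old =>
           match dm.lookup old with
           | some nv => "dataid=" ++ PySem.Int.toStr nv
           | none => line) :: pvUpdLoop dm rest inB
    else
      line :: pvUpdLoop dm rest inB

def update_grp_content_py (grp_content : String) (dat_mapping : List (Int × Int)) : String :=
  PySem.Str.join "\n" (pvUpdLoop dat_mapping (PySem.Str.splitlines grp_content) false)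

-- ===== PORT B =====
-- B's helper _map_line (same ValueError convention as A's port: excluded by Pre_).
def pvMapLine (line : String) (dm : List (Int × Int)) : String :=
  if PySem.Str.startswith line "dataid=" then
    match PySem.List.pyGet? (((PySem.Str.split? line "=").getD [])) 1 with
    | none => line
    | some part =>
      match PySem.Int.ofStr? part with
      | none => line
      | some old =>
        match dm.lookup old with
        | some nv => "dataid=" ++ PySem.Int.toStr nv
        | none => line
  else line

-- partition the lines into segments delimited by '.' lines
def pvSplitDots : List String → List (List String)
  | [] => [[]]
  | l :: rest =>
    if l = "." then [] :: pvSplitDots rest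
    else
      match pvSplitDots rest with
      | s :: ss => (l :: s) :: ss
      | [] => [[l]]

-- reassemble: emit '.' before every segment but the first; map odd-indexed segments
def pvAssemble (dm : List (Int × Int)) : Nat → List (List String) → List String
  | _, [] => []
  | i, seg :: rest =>
    (if i = 0 then [] else ["."]) ++
    (if i % 2 = 1 then seg.map (fun l => pvMapLine l dm) else seg) ++
    pvAssemble dm (i + 1) rest

def update_grp_content_py_alt (grp_content : String) (dat_mapping : List (Int × Int)) : String :=
  PySem.Str.join "\n" (pvAssemble dat_mapping 0 (pvSplitDots (PySem.Str.splitlines grp_content)))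

-- ===== PRECONDITION & SPEC =====
-- Pre_ excludes exactly the inputs where A raises ValueError: a line starting with 'dataid='
-- that lies inside a brush section (an odd number of '.' lines precede it) and whose part
-- after the first '=' is not a valid int literal.
def Pre_update_grp_content_py (grp_content : String) (dat_mapping : List (Int × Int)) : Prop :=
  ∀ i < (PySem.Str.splitlines grp_content).length,
    ((PySem.Str.splitlines grp_content).take i).count "." % 2 = 1 →
    PySem.Str.startswith ((PySem.Str.splitlines grp_content).getD i "") "dataid=" = true →
    (PySem.Int.ofStr?
      (((PySem.Str.split? ((PySem.Str.splitlines grp_content).getD i "") "=").getD [])[1]?.getD "")).isSome = true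

instance (grp_content : String) (dat_mapping : List (Int × Int)) : Decidable (Pre_update_grp_content_py grp_content dat_mapping) := by unfold Pre_update_grp_content_py; infer_instance

def pvWitness_update_grp_content_py : String × (List (Int × Int)) :=
  ("layer\n.\ndataid=3\n.\ntail", [(3, 7)])

def Spec_update_grp_content_py (grp_content : String) (dat_mapping : List (Int × Int)) (out : String) : Prop := out = update_grp_content_py_alt grp_content dat_mapping
instance (grp_content : String) (dat_mapping : List (Int × Int)) (out : String) : Decidable (Spec_update_grp_content_py grp_content dat_mapping out) := by unfold Spec_update_grp_content_py; infer_instance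

-- ===== CLAIM (what is proved, stated in full; the proofs are below) =====
def Claim_equal_update_grp_content_py : Prop := ∀ (grp_content : String) (dat_mapping : List (Int × Int)), Dom_update_grp_content_py grp_content dat_mapping → Pre_update_grp_content_py grp_content dat_mapping → Spec_update_grp_content_py grp_content dat_mapping (update_grp_content_py grp_content dat_mapping)

-- ===== LEMMAS AND PROOFS =====

-- the common value both reassemblies compute: segments glued with '.' separators,
-- mapping alternate segments starting with flag b
def pvGlue (dm : List (Int × Int)) : Bool → List (List String) → List String
  | _, [] => []
  | b, s :: ss =>
    (if b then s.map (fun l => pvMapLine l dm) else s) ++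
    (if ss.isEmpty then [] else "." :: pvGlue dm (!b) ss)

theorem pvSplitDots_ne_nil (lines : List String) : pvSplitDots lines ≠ [] := by
  cases lines with
  | nil => simp [pvSplitDots]
  | cons l rest =>
    simp only [pvSplitDots]
    split
    · simp
    · cases h : pvSplitDots rest <;> simp

theorem pvUpdLoop_cons_ne (dm : List (Int × Int)) (l : String) (rest : List String) (b : Bool)
    (hd : l ≠ ".") :
    pvUpdLoop dm (l :: rest) b = (if b then pvMapLine l dm else l) :: pvUpdLoop dm rest b := by
  simp only [pvUpdLoop, if_neg hd]
  cases b with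
  | false => simp
  | true =>
    simp only [Bool.true_and, if_true]
    unfold pvMapLine
    split <;> rfl

theorem pvUpdLoop_eq_glue (dm : List (Int × Int)) (lines : List String) (b : Bool) :
    pvUpdLoop dm lines b = pvGlue dm b (pvSplitDots lines) := by
  induction lines generalizing b with
  | nil => simp [pvUpdLoop, pvSplitDots, pvGlue]
  | cons l rest ih =>
    by_cases hd : l = "."
    · subst hd
      have hiE : (pvSplitDots rest).isEmpty = false := by
        simpa [List.isEmpty_iff] using pvSplitDots_ne_nil rest
      have hA : pvUpdLoop dm ("." :: rest) b = "." :: pvUpdLoop dm rest (!b) := rfl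
      have hS : pvSplitDots ("." :: rest) = [] :: pvSplitDots rest := rfl
      rw [hA, hS, ih]
      cases b <;> simp [pvGlue, hiE]
    · obtain ⟨s, ss, hs⟩ : ∃ s ss, pvSplitDots rest = s :: ss := by
        cases h : pvSplitDots rest with
        | nil => exact absurd h (pvSplitDots_ne_nil rest)
        | cons s ss => exact ⟨s, ss, rfl⟩
      have hS : pvSplitDots (l :: rest) = (l :: s) :: ss := by
        simp only [pvSplitDots, if_neg hd, hs]
      rw [pvUpdLoop_cons_ne dm l rest b hd, ih, hS, hs]
      cases b <;> simp [pvGlue]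

theorem pvAssemble_eq_glue (dm : List (Int × Int)) (ss : List (List String)) (i : Nat)
    (hi : i ≠ 0) :
    pvAssemble dm i ss = if ss.isEmpty then [] else "." :: pvGlue dm (decide (i % 2 = 1)) ss := by
  induction ss generalizing i with
  | nil => simp [pvAssemble]
  | cons s ss ih =>
    have hpar : decide ((i + 1) % 2 = 1) = !decide (i % 2 = 1) := by
      cases h : decide (i % 2 = 1) <;> simp at h ⊢ <;> omega
    rw [pvAssemble, if_neg hi, ih (i + 1) (by omega), hpar]
    cases hb : decide (i % 2 = 1) with
    | false => have h2 : ¬ i % 2 = 1 := of_decide_eq_false hb; simp [pvGlue, h2]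
    | true => have h2 : i % 2 = 1 := of_decide_eq_true hb; simp [pvGlue, h2]

theorem pvAssemble_zero_eq_glue (dm : List (Int × Int)) (s : List String)
    (ss : List (List String)) :
    pvAssemble dm 0 (s :: ss) = pvGlue dm false (s :: ss) := by
  rw [pvAssemble, pvAssemble_eq_glue dm ss 1 (by omega)]
  simp [pvGlue]

-- ===== VERDICT (by name: the statement is the Claim_ definition above) =====
theorem update_grp_content_py_spec : Claim_equal_update_grp_content_py := by
  intro g dm _ _
  unfold Spec_update_grp_content_py update_grp_content_py update_grp_content_py_alt
  obtain ⟨s, ss, hs⟩ : ∃ s ss, pvSplitDots (PySem.Str.splitlines g) = s :: ss := by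
    cases h : pvSplitDots (PySem.Str.splitlines g) with
    | nil => exact absurd h (pvSplitDots_ne_nil _)
    | cons s ss => exact ⟨s, ss, rfl⟩
  rw [pvUpdLoop_eq_glue, hs, pvAssemble_zero_eq_glue]
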